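-- pv_equiv track=rewrite | github.com/TeamMoegMC/EnergyLevelTransition | src/util/utils.py | invert_injective_mapping
-- ===== SOURCE A (Python) =====
-- from typing import Mapping, MutableMapping, Any, Set, Callable, Tuple
--
-- def invert_injective_mapping(d: Mapping) -> Mapping:
--     """ Given an injective mapping a : A -> B, returns the map a' : B -> A """
--     f = dict()
--     for k, v in d.items():
--         if v not in f:
--             f[v] = k
--         else:
--             raise ValueError('Tried to injective invert a non-injective mapping')
--     return f
-- ===== SOURCE B (Python) =====
-- def invert_injective_mapping(d):
--     """ Given an injective mapping a : A -> B, returns the map a' : B -> A """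
--     keys = list(d.keys())
--     vals = list(d.values())
--     if len(set(vals)) != len(vals):
--         raise ValueError('Tried to injective invert a non-injective mapping')
--     return dict(zip(vals, keys))
-- ===== Notes on version B (the rewrite author's own statement) =====
-- stated objective: alternative
-- what changed: A builds the inverse pair by pair with an in-loop membership test that raises mid-iteration; B never iterates pairs itself: it extracts the key and value columns, validates injectivity up front by comparing len(set(vals)) with len(vals), and then constructs the whole inverse in one shot as dict(zip(vals, keys)).
import Mathlib
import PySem

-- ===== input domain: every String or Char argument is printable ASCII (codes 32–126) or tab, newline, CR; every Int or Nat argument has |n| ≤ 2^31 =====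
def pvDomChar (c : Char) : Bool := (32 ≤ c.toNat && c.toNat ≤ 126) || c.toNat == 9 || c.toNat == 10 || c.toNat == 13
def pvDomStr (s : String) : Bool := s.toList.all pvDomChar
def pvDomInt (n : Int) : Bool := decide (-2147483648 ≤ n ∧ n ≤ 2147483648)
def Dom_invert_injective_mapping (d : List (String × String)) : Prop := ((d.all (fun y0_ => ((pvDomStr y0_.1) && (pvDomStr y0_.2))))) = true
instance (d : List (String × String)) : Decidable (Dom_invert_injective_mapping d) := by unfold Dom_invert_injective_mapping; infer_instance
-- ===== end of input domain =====

-- B validates injectivity up front via set-of-values size, then builds the inverse as dict(zip(vals, keys)); objective: alternative decomposition.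


-- ===== PORT A =====
-- 'for k, v in d.items(): if v not in f: f[v] = k else: raise ValueError(...)';
-- the explicit raise is modelled by 'none' (such inputs are outside Pre_).
def invertLoopA : List (String × String) → PySem.Dict String String → Option (PySem.Dict String String)
  | [], f => some f
  | (k, v) :: rest, f =>
      if f.contains v then none   -- raise ValueError('Tried to injective invert a non-injective mapping')
      else invertLoopA rest (f.insert v k)

def invert_injective_mapping (d : List (String × String)) : List (String × String) :=
  match invertLoopA d PySem.Dict.empty with
  | some f => f.items
  | none => []   -- unreachable under Pre_ (Python raises here)

-- ===== PORT B =====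
-- keys = list(d.keys()); vals = list(d.values());
-- if len(set(vals)) != len(vals): raise ValueError(...); return dict(zip(vals, keys))
def invert_injective_mapping_alt (d : List (String × String)) : List (String × String) :=
  let keys := d.map Prod.fst
  let vals := d.map Prod.snd
  if (PySem.Set.ofList vals).length = vals.length then
    (PySem.Dict.ofList (vals.zip keys)).items
  else []   -- raise ValueError(...): unreachable under Pre_

-- ===== PRECONDITION & SPEC =====
-- Pre_ excludes lists with duplicate values, on which both A and B raise ValueError,
-- and lists with duplicate keys, which do not encode a Python dict (dict keys are unique).
def Pre_invert_injective_mapping (d : List (String × String)) : Prop :=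
  (d.map Prod.fst).Nodup ∧ (d.map Prod.snd).Nodup
instance (d : List (String × String)) : Decidable (Pre_invert_injective_mapping d) := by
  unfold Pre_invert_injective_mapping; infer_instance

def pvWitness_invert_injective_mapping : (List (String × String)) := [("a", "1"), ("b", "2")]

def Spec_invert_injective_mapping (d : List (String × String)) (out : List (String × String)) : Prop := out = invert_injective_mapping_alt d
instance (d : List (String × String)) (out : List (String × String)) : Decidable (Spec_invert_injective_mapping d out) := by unfold Spec_invert_injective_mapping; infer_instance

-- ===== CLAIM (what is proved, stated in full; the proofs are below) =====
def Claim_equal_invert_injective_mapping : Prop := ∀ (d : List (String × String)), Dom_invert_injective_mapping d → Pre_invert_injective_mapping d → Spec_invert_injective_mapping d (invert_injective_mapping d)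

-- ===== LEMMAS AND PROOFS =====

-- A's loop, run over items with values fresh for f, succeeds and appends the swapped pairs.
theorem invertLoopA_spec (l : List (String × String)) (f : PySem.Dict String String)
    (hnd : (l.map Prod.snd).Nodup) (hfresh : ∀ p ∈ l, f.contains p.2 = false) :
    ∃ g, invertLoopA l f = some g ∧ g.items = f.items ++ l.map (fun p => (p.2, p.1)) := by
  induction l generalizing f with
  | nil => exact ⟨f, rfl, by simp⟩
  | cons p rest ih =>
    obtain ⟨k, v⟩ := p
    simp only [List.map_cons, List.nodup_cons] at hnd
    have hfv : f.contains v = false := hfresh (k, v) (List.mem_cons_self)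
    have hfresh' : ∀ q ∈ rest, (f.insert v k).contains q.2 = false := by
      intro q hq
      rw [PySem.Dict.contains_insert]
      have h1 : (q.2 == v) = false := by
        simp only [beq_eq_false_iff_ne, ne_eq]
        intro h; exact hnd.1 (h ▸ List.mem_map_of_mem hq)
      rw [h1, hfresh q (List.mem_cons_of_mem _ hq)]; rfl
    obtain ⟨g, hg, hitems⟩ := ih (f.insert v k) hnd.2 hfresh'
    refine ⟨g, ?_, ?_⟩
    · simp [invertLoopA, hfv, hg]
    · rw [hitems, PySem.Dict.items_insert_of_not_contains f k hfv]
      simp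

-- ===== VERDICT (by name: the statement is the Claim_ definition above) =====
theorem invert_injective_mapping_spec : Claim_equal_invert_injective_mapping := by
  intro d _ hpre
  unfold Spec_invert_injective_mapping invert_injective_mapping invert_injective_mapping_alt
  have hsnd : (d.map Prod.snd).Nodup := hpre.2
  -- A side
  obtain ⟨g, hg, hitems⟩ := invertLoopA_spec d PySem.Dict.empty hsnd
    (fun p _ => PySem.Dict.contains_empty p.2)
  rw [hg]
  -- B side: the set-size test passes
  have hset : PySem.Set.ofList (d.map Prod.snd) = d.map Prod.snd :=
    PySem.Set.ofList_eq_self_of_nodup _ hsnd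
  have hzip : (d.map Prod.snd).zip (d.map Prod.fst) = d.map (fun p => (p.2, p.1)) := by
    rw [List.zip_map']
  have hB : (PySem.Dict.ofList ((d.map Prod.snd).zip (d.map Prod.fst))).items
      = d.map (fun p => (p.2, p.1)) := by
    rw [hzip, PySem.Dict.ofList]
    have := PySem.Dict.items_foldl_insert_fresh (k := Prod.fst) (v := Prod.snd)
      (l := d.map (fun p => (p.2, p.1))) (d := PySem.Dict.empty)
      (fun a _ => PySem.Dict.contains_empty a.1) (by simpa using hsnd)
    simpa using this
  simp only [hset, hB, hitems]
  rfl
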